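-- pv_equiv track=rewrite | github.com/jakapongh/iccs101 | hw-05/sgroup-bad.py | get_biggest_dists
-- ===== SOURCE A (Python) =====
-- def get_biggest_dists(data: list[int]):
--     # Find all gaps
--     idx = 0
--     biggest_dists_idx = tuple()
--     biggest_dists = None
--     while idx < len(data):
--         if (idx + 1) < len(data):
--             distance = abs(data[idx] - data[idx + 1])
--
--             if biggest_dists is None or distance > biggest_dists:
--                 biggest_dists = distance
--                 biggest_dists_idx = (idx, idx + 1,)
--
--         idx += 1
--
--     return biggest_dists, biggest_dists_idx
-- ===== SOURCE B (Python) =====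
-- def get_biggest_dists(data: list[int]):
--     diffs = [abs(data[i] - data[i + 1]) for i in range(len(data) - 1)]
--     if not diffs:
--         return None, ()
--     m = max(diffs)
--     j = diffs.index(m)
--     return m, (j, j + 1)
-- ===== Notes on version B (the rewrite author's own statement) =====
-- stated objective: simpler
-- what changed: Replaced the fused while-loop running strict-max with index bookkeeping by a build-then-reduce decomposition: materialise the adjacent-difference list, then max() and .index() locate the leftmost maximum.
import Mathlib
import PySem

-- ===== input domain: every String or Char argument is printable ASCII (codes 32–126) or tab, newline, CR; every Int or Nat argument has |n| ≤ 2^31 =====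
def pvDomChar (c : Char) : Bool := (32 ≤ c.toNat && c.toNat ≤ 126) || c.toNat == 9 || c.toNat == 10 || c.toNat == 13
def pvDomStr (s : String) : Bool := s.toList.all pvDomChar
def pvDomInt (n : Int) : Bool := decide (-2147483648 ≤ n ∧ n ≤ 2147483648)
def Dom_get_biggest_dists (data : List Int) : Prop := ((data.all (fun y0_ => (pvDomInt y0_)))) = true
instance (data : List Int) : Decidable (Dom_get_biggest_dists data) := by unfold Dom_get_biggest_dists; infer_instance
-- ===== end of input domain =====

-- B replaces A's fused while-loop running max with a build-the-difference-list-then-max/index decomposition (simpler; same cost).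


-- ===== PORT A =====
-- while idx < len(data): if idx+1 < len(data): update running max; idx += 1
-- ported as a fold over List.range data.length (idx is always in range, so data.getD is exact)
def aStep (data : List Int) (st : Option Int × List Int) (idx : Nat) : Option Int × List Int :=
  if idx + 1 < data.length then
    let distance := |data.getD idx 0 - data.getD (idx + 1) 0|
    match st.1 with
    | none => (some distance, [(idx : Int), (idx : Int) + 1])
    | some b => if distance > b then (some distance, [(idx : Int), (idx : Int) + 1]) else st
  else st

def get_biggest_dists (data : List Int) : Option Int × List Int :=
  (List.range data.length).foldl (aStep data) (none, [])

-- ===== PORT B =====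
def get_biggest_dists_alt (data : List Int) : Option Int × List Int :=
  let diffs := (List.range (data.length - 1)).map (fun i => |data.getD i 0 - data.getD (i + 1) 0|)
  match PySem.List.max? diffs (fun y => y) with
  | none => (none, [])
  | some m =>
      let j := (PySem.List.index? diffs m).getD 0
      (some m, [(j : Int), (j : Int) + 1])

-- ===== PRECONDITION & SPEC =====
def Spec_get_biggest_dists (data : List Int) (out : Option Int × List Int) : Prop := out = get_biggest_dists_alt data
instance (data : List Int) (out : Option Int × List Int) : Decidable (Spec_get_biggest_dists data out) := by unfold Spec_get_biggest_dists; infer_instance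

-- ===== CLAIM (what is proved, stated in full; the proofs are below) =====
def Claim_equal_get_biggest_dists : Prop := ∀ (data : List Int), Dom_get_biggest_dists data → Spec_get_biggest_dists data (get_biggest_dists data)

-- ===== LEMMAS AND PROOFS =====

-- abstract version of A's loop over the already-computed difference values, with the running index k
def runA : Option Int × List Int → List Int → Nat → Option Int × List Int
  | st, [], _ => st
  | (b, bi), d :: l, k =>
      match b with
      | none => runA (some d, [(k : Int), (k : Int) + 1]) l (k + 1)
      | some b' =>
          if d > b' then runA (some d, [(k : Int), (k : Int) + 1]) l (k + 1)
          else runA (some b', bi) l (k + 1)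

theorem le_foldl_max_init (l : List Int) (b : Int) : b ≤ l.foldl max b := by
  induction l generalizing b with
  | nil => simp
  | cons d l ih => exact le_trans (le_max_left b d) (ih (max b d))

theorem le_foldl_max_mem (l : List Int) (b x : Int) (hx : x ∈ l) : x ≤ l.foldl max b := by
  induction l generalizing b with
  | nil => simp at hx
  | cons d l ih =>
      rcases List.mem_cons.1 hx with rfl | h
      · exact le_trans (le_max_right b x) (le_foldl_max_init l (max b x))
      · exact ih (max b d) h

theorem foldl_max_of_all_le (l : List Int) (b : Int) (h : ∀ x ∈ l, x ≤ b) :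
    l.foldl max b = b := by
  induction l generalizing b with
  | nil => rfl
  | cons d l ih =>
      have hd : d ≤ b := h d (List.mem_cons_self ..)
      have : max b d = b := max_eq_left hd
      rw [List.foldl_cons, this]
      exact ih b (fun x hx => h x (List.mem_cons_of_mem _ hx))

theorem foldl_max_mem_or (l : List Int) (b : Int) : l.foldl max b = b ∨ l.foldl max b ∈ l := by
  induction l generalizing b with
  | nil => exact Or.inl rfl
  | cons d l ih =>
      rcases ih (max b d) with h | h
      · rcases max_cases b d with ⟨he, _⟩ | ⟨he, _⟩
        · exact Or.inl (by rw [List.foldl_cons, h, he])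
        · exact Or.inr (by rw [List.foldl_cons, h, he]; exact List.mem_cons_self ..)
      · exact Or.inr (List.mem_cons_of_mem _ h)

-- the key invariant: A's running strict-max loop from state (some b, bi) returns the leftmost
-- maximum of the remaining values if one exceeds b, and the state unchanged otherwise
theorem runA_some (l : List Int) : ∀ (b : Int) (bi : List Int) (k : Nat),
    runA (some b, bi) l k =
      if ∀ x ∈ l, x ≤ b then (some b, bi)
      else (some (l.foldl max b),
            [((k + (PySem.List.index? l (l.foldl max b)).getD 0 : Nat) : Int),
             ((k + (PySem.List.index? l (l.foldl max b)).getD 0 : Nat) : Int) + 1]) := by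
  induction l with
  | nil => intro b bi k; simp [runA]
  | cons d l ih =>
      intro b bi k
      by_cases hdb : d > b
      · have hnall : ¬ ∀ x ∈ d :: l, x ≤ b := by
          intro h; exact absurd (h d (List.mem_cons_self ..)) (not_le.2 hdb)
        rw [if_neg hnall]
        have hstep : runA (some b, bi) (d :: l) k = runA (some d, [(k : Int), (k : Int) + 1]) l (k + 1) := by
          simp [runA, hdb]
        rw [hstep, ih d _ (k + 1)]
        have hmaxbd : max b d = d := max_eq_right (le_of_lt hdb)
        by_cases hall : ∀ x ∈ l, x ≤ d
        · rw [if_pos hall]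
          have hfold : (d :: l).foldl max b = d := by
            rw [List.foldl_cons, hmaxbd]; exact foldl_max_of_all_le l d hall
          rw [hfold, PySem.List.index?_cons_self]
          simp
        · rw [if_neg hall]
          push Not at hall
          obtain ⟨x, hxl, hxd⟩ := hall
          have hfold : (d :: l).foldl max b = l.foldl max d := by
            rw [List.foldl_cons, hmaxbd]
          have hdM : d < l.foldl max d := lt_of_lt_of_le hxd (le_foldl_max_mem l d x hxl)
          have hidx : PySem.List.index? (d :: l) (l.foldl max d) =
              (PySem.List.index? l (l.foldl max d)).map (· + 1) :=
            PySem.List.index?_cons_of_ne l (ne_of_lt hdM)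
          have hMmem : l.foldl max d ∈ l := by
            rcases foldl_max_mem_or l d with h | h
            · exact absurd h (ne_of_gt hdM)
            · exact h
          obtain ⟨j, hj⟩ := Option.isSome_iff_exists.1
            ((PySem.List.index?_isSome_iff l (l.foldl max d)).2 hMmem)
          rw [hfold, hidx, hj]
          simp only [Option.map_some, Option.getD_some]
          have harith : k + 1 + j = k + (j + 1) := by omega
          rw [harith]
      · have hdble : d ≤ b := not_lt.1 hdb
        have hstep : runA (some b, bi) (d :: l) k = runA (some b, bi) l (k + 1) := by
          simp [runA, hdb]
        rw [hstep, ih b bi (k + 1)]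
        have hmaxbd : max b d = b := max_eq_left hdble
        by_cases hall : ∀ x ∈ l, x ≤ b
        · have hall' : ∀ x ∈ d :: l, x ≤ b := by
            intro x hx
            rcases List.mem_cons.1 hx with rfl | h
            · exact hdble
            · exact hall x h
          rw [if_pos hall, if_pos hall']
        · rw [if_neg hall, if_neg (by intro h; exact hall (fun x hx => h x (List.mem_cons_of_mem _ hx)))]
          push Not at hall
          obtain ⟨x, hxl, hxb⟩ := hall
          have hfold : (d :: l).foldl max b = l.foldl max b := by
            rw [List.foldl_cons, hmaxbd]
          have hdM : d < l.foldl max b :=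
            lt_of_le_of_lt hdble (lt_of_lt_of_le hxb (le_foldl_max_mem l b x hxl))
          have hidx : PySem.List.index? (d :: l) (l.foldl max b) =
              (PySem.List.index? l (l.foldl max b)).map (· + 1) :=
            PySem.List.index?_cons_of_ne l (ne_of_lt hdM)
          have hMmem : l.foldl max b ∈ l := by
            rcases foldl_max_mem_or l b with h | h
            · exact absurd h (by
                intro he
                exact absurd (lt_of_lt_of_le hxb (le_foldl_max_mem l b x hxl)) (by rw [he]; exact lt_irrefl b) )
            · exact h
          obtain ⟨j, hj⟩ := Option.isSome_iff_exists.1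
            ((PySem.List.index?_isSome_iff l (l.foldl max b)).2 hMmem)
          rw [hfold, hidx, hj]
          simp only [Option.map_some, Option.getD_some]
          have harith : k + 1 + j = k + (j + 1) := by omega
          rw [harith]

-- A's fold over in-range indices equals runA on the corresponding difference values
theorem foldl_aStep_range' (data : List Int) : ∀ (m k : Nat) (st : Option Int × List Int),
    k + m < data.length →
    (List.range' k m).foldl (aStep data) st =
      runA st ((List.range' k m).map (fun i => |data.getD i 0 - data.getD (i + 1) 0|)) k := by
  intro m
  induction m with
  | zero => intro k st _; cases st; simp [runA]
  | succ m ih =>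
      intro k st hlt
      rw [List.range'_succ, List.foldl_cons, List.map_cons]
      have hk1 : k + 1 < data.length := by omega
      have hstep : aStep data st k =
          match st.1 with
          | none => (some |data.getD k 0 - data.getD (k + 1) 0|, [(k : Int), (k : Int) + 1])
          | some b => if |data.getD k 0 - data.getD (k + 1) 0| > b
                      then (some |data.getD k 0 - data.getD (k + 1) 0|, [(k : Int), (k : Int) + 1])
                      else st := by
        simp [aStep, hk1]
      obtain ⟨b, bi⟩ := st
      cases b with
      | none =>
          rw [hstep]
          simp only [runA]
          exact ih (k + 1) _ (by omega)
      | some b' =>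
          rw [hstep]
          simp only [runA]
          by_cases hgt : |data.getD k 0 - data.getD (k + 1) 0| > b'
          · rw [if_pos hgt, if_pos hgt]
            exact ih (k + 1) _ (by omega)
          · rw [if_neg hgt, if_neg hgt]
            exact ih (k + 1) _ (by omega)

theorem get_biggest_dists_eq_runA (data : List Int) :
    get_biggest_dists data =
      runA (none, []) ((List.range (data.length - 1)).map
        (fun i => |data.getD i 0 - data.getD (i + 1) 0|)) 0 := by
  unfold get_biggest_dists
  rcases Nat.eq_zero_or_pos data.length with h0 | hpos
  · rw [h0]; simp [runA]
  · obtain ⟨n, hn⟩ := Nat.exists_eq_add_of_lt hpos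
    simp only [Nat.zero_add] at hn
    rw [hn]
    simp only [Nat.add_sub_cancel]
    rw [List.range_succ, List.foldl_append, List.foldl_cons, List.foldl_nil]
    have hlast : aStep data ((List.range n).foldl (aStep data) (none, [])) n =
        (List.range n).foldl (aStep data) (none, []) := by
      unfold aStep
      rw [if_neg (by omega)]
    rw [hlast, List.range_eq_range']
    rw [foldl_aStep_range' data n 0 (none, []) (by omega)]

-- ===== VERDICT (by name: the statement is the Claim_ definition above) =====
theorem get_biggest_dists_spec : Claim_equal_get_biggest_dists := by
  intro data _
  unfold Spec_get_biggest_dists get_biggest_dists_alt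
  rw [get_biggest_dists_eq_runA]
  set f : Nat → Int := fun i => |data.getD i 0 - data.getD (i + 1) 0| with hf
  cases hds : (List.range (data.length - 1)).map f with
  | nil => simp [runA, PySem.List.max?]
  | cons d l =>
      show runA (none, []) (d :: l) 0 =
        (match PySem.List.max? (d :: l) (fun y => y) with
         | none => ((none : Option Int), ([] : List Int))
         | some m => (some m, [((PySem.List.index? (d :: l) m).getD 0 : Int),
                               ((PySem.List.index? (d :: l) m).getD 0 : Int) + 1]))
      simp only [PySem.List.max?_id_cons, runA, Nat.zero_add]
      rw [runA_some l d _ 1]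
      by_cases hall : ∀ x ∈ l, x ≤ d
      · rw [if_pos hall, foldl_max_of_all_le l d hall, PySem.List.index?_cons_self]
        norm_num
      · rw [if_neg hall]
        push Not at hall
        obtain ⟨x, hxl, hxd⟩ := hall
        have hdM : d < l.foldl max d := lt_of_lt_of_le hxd (le_foldl_max_mem l d x hxl)
        have hMmem : l.foldl max d ∈ l := by
          rcases foldl_max_mem_or l d with h | h
          · exact absurd h (ne_of_gt hdM)
          · exact h
        have hidx : PySem.List.index? (d :: l) (l.foldl max d) =
            (PySem.List.index? l (l.foldl max d)).map (· + 1) :=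
          PySem.List.index?_cons_of_ne l (ne_of_lt hdM)
        obtain ⟨j, hj⟩ := Option.isSome_iff_exists.1
          ((PySem.List.index?_isSome_iff l (l.foldl max d)).2 hMmem)
        rw [hidx, hj]
        simp only [Option.map_some, Option.getD_some]
        have harith : 1 + j = j + 1 := by omega
        rw [harith]
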